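-- pv_equiv track=rewrite | github.com/clade/PyDAQmx | pydaqmx/util/pep8_conversion.py | magic_split
-- ===== SOURCE A (Python) =====
-- magic = ['dB', 'IDs', 'GPS', 'AI', 'CI', 'DAQmx']
--
-- def magic_split(name_ini):
--     for name in name_ini.split('_'):
--         for elm in magic:
--             if elm in name:
--                 deb, fin = name.split(elm, 1)
--                 yield deb
--                 yield elm.lower()
--                 for e in magic_split(fin):
--                     yield e
--                 return
--         else:
--             yield name
-- ===== SOURCE B (Python) =====
-- magic = ['dB', 'IDs', 'GPS', 'AI', 'CI', 'DAQmx']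
--
--
-- def magic_split(name_ini):
--     # Iterative re-implementation: no recursion, no nested generators.
--     for part in name_ini.split('_'):
--         elm0 = next((m for m in magic if m in part), None)
--         if elm0 is None:
--             yield part
--             continue
--         # first magic-bearing part: peel magic tokens off it, then stop entirely
--         name = part
--         while True:
--             elm = next((m for m in magic if m in name), None)
--             if elm is None:
--                 yield name
--                 return
--             deb, fin = name.split(elm, 1)
--             yield deb
--             yield elm.lower()
--             name = fin
-- ===== Notes on version B (the rewrite author's own statement) =====
-- stated objective: alternative
-- what changed: Replaces A's recursive generator (which recurses into magic_split(fin) and re-yields from the nested generator) with a flat iterative generator: yield magic-free underscore parts until the first magic-bearing one, then an inner while loop peels magic tokens off that part and the generator returns.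
import Mathlib
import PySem

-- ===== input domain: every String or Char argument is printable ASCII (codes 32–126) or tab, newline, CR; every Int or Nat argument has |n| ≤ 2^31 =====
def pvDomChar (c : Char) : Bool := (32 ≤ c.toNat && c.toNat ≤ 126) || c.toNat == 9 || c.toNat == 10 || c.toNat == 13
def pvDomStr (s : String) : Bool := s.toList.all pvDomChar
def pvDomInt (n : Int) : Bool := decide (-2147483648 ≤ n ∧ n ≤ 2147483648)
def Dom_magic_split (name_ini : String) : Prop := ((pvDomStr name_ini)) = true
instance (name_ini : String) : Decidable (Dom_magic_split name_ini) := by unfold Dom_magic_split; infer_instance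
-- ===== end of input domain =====

-- B replaces A's recursive generator (nested generator re-yield on the tail) by a flat
-- iterative loop with an inner while loop; same values, no speed claim.

-- the module constant `magic` (shared by both Pythons)
def pvMagic : List (List Char) :=
  [['d','B'], ['I','D','s'], ['G','P','S'], ['A','I'], ['C','I'], ['D','A','Q','m','x']]

-- ===== PORT A =====
-- A's generator: the outer `for name in name_ini.split('_')` is the recursion on `parts`;
-- the recursive call `magic_split(fin)` consumes one unit of fuel (fuel only makes the
-- Python recursion, whose argument strictly shrinks, structurally total).
def pvAgo (fuel : Nat) (parts : List (List Char)) : List (List Char) :=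
  match parts with
  | [] => []
  | name :: rest =>
    match pvMagic.find? (fun elm => PySem.Chars.isIn elm name) with
    | none => name :: pvAgo fuel rest
    | some elm =>
      let pieces := PySem.Chars.splitOnMax name elm 1   -- deb, fin = name.split(elm, 1)
      match fuel with
      | 0 => []
      | fuel' + 1 =>
        pieces.getD 0 [] :: PySem.Chars.lower elm ::
          pvAgo fuel' (PySem.Chars.splitOn (pieces.getD 1 []) ['_'])
  termination_by (fuel, parts.length)

def magic_split (name_ini : String) : List String :=
  (pvAgo (name_ini.toList.length + 1) (PySem.Chars.splitOn name_ini.toList ['_'])).map String.ofList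

-- ===== PORT B =====
-- next((m for m in magic if m in s), None)
def pvFirstMagic (s : List Char) : Option (List Char) :=
  pvMagic.find? (fun m => PySem.Chars.isIn m s)

-- the `while True:` loop of B, peeling magic tokens off one underscore-free part
def pvBwhile (fuel : Nat) (name : List Char) : List (List Char) :=
  match pvFirstMagic name with
  | none => [name]
  | some elm =>
    let pieces := PySem.Chars.splitOnMax name elm 1     -- deb, fin = name.split(elm, 1)
    match fuel with
    | 0 => []
    | fuel' + 1 => pieces.getD 0 [] :: PySem.Chars.lower elm :: pvBwhile fuel' (pieces.getD 1 [])

-- the `for part in name_ini.split('_')` loop of B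
def pvBgo (fuel : Nat) (parts : List (List Char)) : List (List Char) :=
  match parts with
  | [] => []
  | part :: rest =>
    match pvFirstMagic part with
    | none => part :: pvBgo fuel rest
    | some _ => pvBwhile fuel part                      -- generator stops after this part

def magic_split_alt (name_ini : String) : List String :=
  (pvBgo (name_ini.toList.length + 1) (PySem.Chars.splitOn name_ini.toList ['_'])).map String.ofList

-- ===== PRECONDITION & SPEC =====
def Spec_magic_split (name_ini : String) (out : List String) : Prop := out = magic_split_alt name_ini
instance (name_ini : String) (out : List String) : Decidable (Spec_magic_split name_ini out) := by unfold Spec_magic_split; infer_instance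

-- ===== CLAIM (what is proved, stated in full; the proofs are below) =====
def Claim_equal_magic_split : Prop := ∀ (name_ini : String), Dom_magic_split name_ini → Spec_magic_split name_ini (magic_split name_ini)

-- ===== LEMMAS AND PROOFS =====

-- split('_') on an underscore-free string is the singleton
theorem pv_go_noSep (l : List Char) : ∀ (fuel : Nat) (cur : List Char) (acc : List (List Char)),
    l.length < fuel → '_' ∉ l →
    PySem.Chars.splitOn.go ['_'] fuel l cur acc = acc.reverse ++ [cur.reverse ++ l] := by
  induction l with
  | nil =>
    intro fuel cur acc hf _
    cases fuel with
    | zero => omega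
    | succ f => simp [PySem.Chars.splitOn.go]
  | cons c rest ih =>
    intro fuel cur acc hf hni
    cases fuel with
    | zero => simp at hf
    | succ f =>
      have hc : c ≠ '_' := by intro h; exact hni (h ▸ List.mem_cons_self)
      have hpre : (['_'] : List Char).isPrefixOf (c :: rest) = false := by
        simp [List.isPrefixOf]; exact fun h => (hc h.symm).elim
      have : rest.length < f := by simpa using Nat.lt_of_succ_lt_succ hf
      simp only [PySem.Chars.splitOn.go, hpre, Bool.false_eq_true, if_false]
      rw [ih f (c :: cur) acc this (fun h => hni (List.mem_cons_of_mem _ h))]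
      simp

theorem pv_splitOn_noSep (s : List Char) (h : '_' ∉ s) :
    PySem.Chars.splitOn s ['_'] = [s] := by
  unfold PySem.Chars.splitOn
  rw [pv_go_noSep s (s.length + 1) [] [] (by omega) h]
  simp

-- every part produced by split('_') is underscore-free
theorem pv_go_parts_noSep : ∀ (fuel : Nat) (l cur : List Char) (acc : List (List Char)),
    l.length < fuel → '_' ∉ cur → (∀ q ∈ acc, '_' ∉ q) →
    ∀ p ∈ PySem.Chars.splitOn.go ['_'] fuel l cur acc, '_' ∉ p := by
  intro fuel
  induction fuel with
  | zero => intro l cur acc hf; omega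
  | succ f ih =>
    intro l cur acc hf hcur hacc p hp
    cases l with
    | nil =>
      simp [PySem.Chars.splitOn.go] at hp
      rcases hp with h | h
      · exact hacc _ h
      · subst h; simpa using hcur
    | cons c rest =>
      by_cases hpre : (['_'] : List Char).isPrefixOf (c :: rest) = true
      · have hc : c = '_' := by have h2 := hpre; simp [List.isPrefixOf] at h2; exact h2.symm
        simp only [PySem.Chars.splitOn.go, hpre, if_true] at hp
        have : (List.drop 1 (c :: rest)).length < f := by simp at hf ⊢; omega
        exact ih (List.drop 1 (c :: rest)) [] (cur.reverse :: acc) this (by simp)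
          (by intro q hq; rcases List.mem_cons.mp hq with hq | hq
              · subst hq; simpa using hcur
              · exact hacc _ hq) p (by simpa using hp)
      · have hc : c ≠ '_' := by
          intro h; exact hpre (by simp [List.isPrefixOf, h])
        have hpre' : (['_'] : List Char).isPrefixOf (c :: rest) = false := by
          cases hb : (['_'] : List Char).isPrefixOf (c :: rest) with
          | false => rfl
          | true => exact absurd hb hpre
        simp only [PySem.Chars.splitOn.go, hpre', Bool.false_eq_true, if_false] at hp
        have : rest.length < f := by simp at hf; omega
        exact ih rest (c :: cur) acc this
          (by intro hm; rcases List.mem_cons.mp hm with hh | hh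
              · exact hc hh.symm
              · exact hcur hh) hacc p hp

theorem pv_splitOn_parts_noSep (s : List Char) :
    ∀ p ∈ PySem.Chars.splitOn s ['_'], '_' ∉ p := by
  intro p hp
  exact pv_go_parts_noSep (s.length + 1) s [] [] (by omega) (by simp) (by simp) p hp

-- every character of every piece of split(elm, 1) comes from the split string
theorem pv_goMax_chars : ∀ (fuel : Nat) (sep : List Char) (m : Nat) (l cur : List Char)
    (acc : List (List Char)) (p : List Char),
    p ∈ PySem.Chars.splitOnMax.go sep fuel m l cur acc →
    ∀ c ∈ p, c ∈ l ∨ c ∈ cur ∨ ∃ q ∈ acc, c ∈ q := by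
  intro fuel
  induction fuel with
  | zero =>
    intro sep m l cur acc p hp c hc
    simp [PySem.Chars.splitOnMax.go] at hp
    rcases hp with h | h
    · exact Or.inr (Or.inr ⟨p, h, hc⟩)
    · subst h; rcases List.mem_append.mp hc with h | h
      · exact Or.inr (Or.inl (List.mem_reverse.mp h))
      · exact Or.inl h
  | succ f ih =>
    intro sep m l cur acc p hp c hc
    cases l with
    | nil =>
      simp [PySem.Chars.splitOnMax.go] at hp
      rcases hp with h | h
      · exact Or.inr (Or.inr ⟨p, h, hc⟩)
      · subst h; exact Or.inr (Or.inl (by simpa using hc))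
    | cons ch rest =>
      by_cases hm : m = 0
      · subst hm
        simp [PySem.Chars.splitOnMax.go] at hp
        rcases hp with h | h
        · exact Or.inr (Or.inr ⟨p, h, hc⟩)
        · subst h; rcases List.mem_append.mp hc with h | h
          · exact Or.inr (Or.inl (List.mem_reverse.mp h))
          · exact Or.inl h
      · by_cases hpre : sep.isPrefixOf (ch :: rest) = true
        · simp only [PySem.Chars.splitOnMax.go, hm, if_false, hpre, if_true] at hp
          rcases ih sep (m - 1) (List.drop sep.length (ch :: rest)) [] (cur.reverse :: acc) p hp c hc with h | h | ⟨q, hq, hcq⟩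
          · exact Or.inl (List.drop_subset _ _ h)
          · simp at h
          · rcases List.mem_cons.mp hq with hq | hq
            · subst hq; exact Or.inr (Or.inl (List.mem_reverse.mp hcq))
            · exact Or.inr (Or.inr ⟨q, hq, hcq⟩)
        · have hpre' : sep.isPrefixOf (ch :: rest) = false := by
            cases hb : sep.isPrefixOf (ch :: rest) with
            | false => rfl
            | true => exact absurd hb hpre
          simp only [PySem.Chars.splitOnMax.go, hm, if_false, hpre', Bool.false_eq_true] at hp
          rcases ih sep m rest (ch :: cur) acc p hp c hc with h | h | h
          · exact Or.inl (List.mem_cons_of_mem _ h)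
          · rcases List.mem_cons.mp h with hh | hh
            · exact Or.inl (hh ▸ List.mem_cons_self)
            · exact Or.inr (Or.inl hh)
          · exact Or.inr (Or.inr h)

theorem pv_fin_noSep (s elm : List Char) (hs : '_' ∉ s) :
    '_' ∉ (PySem.Chars.splitOnMax s elm 1).getD 1 [] := by
  intro hmem
  have hx : ((PySem.Chars.splitOnMax s elm 1)[1]?).getD [] = (PySem.Chars.splitOnMax s elm 1).getD 1 [] := by
    simp [List.getD_eq_getElem?_getD]
  cases hg : (PySem.Chars.splitOnMax s elm 1)[1]? with
  | none =>
    rw [← hx, hg] at hmem; simp at hmem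
  | some v =>
    have hv : v ∈ PySem.Chars.splitOnMax s elm 1 := List.mem_of_getElem? hg
    have hveq : v = (PySem.Chars.splitOnMax s elm 1).getD 1 [] := by rw [← hx, hg]; rfl
    unfold PySem.Chars.splitOnMax at hv
    simp at hv
    have := pv_goMax_chars (s.length + 1) elm ((1 : Int).toNat) s [] [] v hv '_' (hveq ▸ hmem)
    rcases this with h | h | ⟨q, hq, _⟩
    · exact hs h
    · simp at h
    · simp at hq

-- A's recursion = B's while loop, on underscore-free strings
theorem pv_chain (fuel : Nat) : ∀ s : List Char, '_' ∉ s → pvAgo fuel [s] = pvBwhile fuel s := by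
  induction fuel with
  | zero =>
    intro s hs
    rw [pvAgo, pvBwhile]
    unfold pvFirstMagic
    cases h : pvMagic.find? (fun elm => PySem.Chars.isIn elm s) <;> simp [pvAgo]
  | succ f ih =>
    intro s hs
    rw [pvAgo, pvBwhile]
    unfold pvFirstMagic
    cases h : pvMagic.find? (fun elm => PySem.Chars.isIn elm s) with
    | none => simp [pvAgo]
    | some elm =>
      simp only
      rw [pv_splitOn_noSep _ (pv_fin_noSep s elm hs)]
      rw [ih _ (pv_fin_noSep s elm hs)]

-- A's outer loop = B's outer loop, on lists of underscore-free parts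
theorem pv_outer (parts : List (List Char)) (h : ∀ p ∈ parts, '_' ∉ p) (fuel : Nat) :
    pvAgo fuel parts = pvBgo fuel parts := by
  induction parts with
  | nil => rw [pvAgo, pvBgo]
  | cons part rest ih =>
    rw [pvAgo, pvBgo]
    unfold pvFirstMagic
    cases hf : pvMagic.find? (fun elm => PySem.Chars.isIn elm part) with
    | none =>
      simp only
      rw [ih (fun p hp => h p (List.mem_cons_of_mem _ hp))]
    | some elm =>
      have hpart : '_' ∉ part := h part List.mem_cons_self
      have hc := pv_chain fuel part hpart
      rw [pvAgo] at hc
      simp only [hf] at hc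
      exact hc

-- ===== VERDICT (by name: the statement is the Claim_ definition above) =====
theorem magic_split_spec : Claim_equal_magic_split := by
  intro name_ini _
  unfold Spec_magic_split magic_split magic_split_alt
  rw [pv_outer _ (pv_splitOn_parts_noSep name_ini.toList)]
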